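-- pv_equiv track=rewrite | github.com/jsmith-exe/Logic_Minimization | compare.py | update_weight_groups
-- ===== SOURCE A (Python) =====
-- def update_weight_groups(combined_terms):
--     """Update the weight groups after a round of combinations."""
--     weight_groups = {}
--     for term, _, _ in combined_terms:
--         weight = term.count('1')  # Calculate Hamming weight
--         if weight not in weight_groups:
--             weight_groups[weight] = []
--         weight_groups[weight].append(term)
--     return weight_groups
-- ===== SOURCE B (Python) =====
-- def update_weight_groups(combined_terms):
--     """Group terms by Hamming weight: distinct weights in first-seen order, one filter pass per weight."""
--     terms = [t for t, _, _ in combined_terms]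
--     return {w: [t for t in terms if t.count('1') == w]
--             for w in dict.fromkeys(t.count('1') for t in terms)}
-- ===== Notes on version B (the rewrite author's own statement) =====
-- stated objective: alternative
-- what changed: Replaces the single-pass dict bucketing (conditional key init + append) with a two-phase dict comprehension: dedup the weights in first-seen order via dict.fromkeys, then build each group by filtering the term list once per distinct weight.
import Mathlib
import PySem

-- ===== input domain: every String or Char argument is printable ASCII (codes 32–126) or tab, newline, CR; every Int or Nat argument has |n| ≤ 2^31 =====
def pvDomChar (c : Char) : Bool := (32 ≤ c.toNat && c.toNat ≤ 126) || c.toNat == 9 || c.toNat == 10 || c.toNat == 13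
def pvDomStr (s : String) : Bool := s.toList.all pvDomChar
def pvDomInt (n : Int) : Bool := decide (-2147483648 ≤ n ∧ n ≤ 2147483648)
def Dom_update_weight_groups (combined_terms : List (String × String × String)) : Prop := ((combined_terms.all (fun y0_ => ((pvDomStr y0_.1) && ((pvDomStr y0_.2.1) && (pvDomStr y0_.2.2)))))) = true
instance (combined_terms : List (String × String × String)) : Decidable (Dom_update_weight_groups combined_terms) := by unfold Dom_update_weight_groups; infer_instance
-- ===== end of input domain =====

-- B replaces A's single-pass dict bucketing by an ordered dedup of the weights followed by one filter pass per distinct weight (alternative decomposition, same results).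


-- ===== PORT A =====
-- weight_groups = {}; for term,_,_ in combined_terms: if weight not in wg: wg[weight]=[]; wg[weight].append(term)
def update_weight_groups (combined_terms : List (String × String × String)) : List (Int × List String) :=
  (combined_terms.foldl (fun d t =>
      let w : Int := (PySem.Str.count t.1 "1" : Int)
      let d1 := if d.contains w then d else d.insert w ([] : List String)
      d1.insert w (d1.getD w [] ++ [t.1]))
    (PySem.Dict.empty : PySem.Dict Int (List String))).items

-- ===== PORT B =====
-- t.count('1') as Int
def wtB (t : String) : Int := (PySem.Str.count t "1" : Int)

-- terms = [t for t,_,_ in combined_terms]; {w: [t for t in terms if t.count('1')==w] for w in dict.fromkeys(...)}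
def update_weight_groups_alt (combined_terms : List (String × String × String)) : List (Int × List String) :=
  let terms := combined_terms.map (fun p => p.1)
  (PySem.List.dedup (terms.map wtB)).map (fun w => (w, terms.filter (fun t => wtB t == w)))

-- ===== PRECONDITION & SPEC =====
def Spec_update_weight_groups (combined_terms : List (String × String × String)) (out : List (Int × List String)) : Prop := out = update_weight_groups_alt combined_terms
instance (combined_terms : List (String × String × String)) (out : List (Int × List String)) : Decidable (Spec_update_weight_groups combined_terms out) := by unfold Spec_update_weight_groups; infer_instance

-- ===== CLAIM (what is proved, stated in full; the proofs are below) =====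
def Claim_equal_update_weight_groups : Prop := ∀ (combined_terms : List (String × String × String)), Dom_update_weight_groups combined_terms → Spec_update_weight_groups combined_terms (update_weight_groups combined_terms)

-- ===== LEMMAS AND PROOFS =====

-- A's loop body (init-if-missing, then append) is exactly dict-modify with default [].
theorem stepA_eq_modify (d : PySem.Dict Int (List String)) (t : String × String × String) :
    (let w : Int := (PySem.Str.count t.1 "1" : Int)
     let d1 := if d.contains w then d else d.insert w ([] : List String)
     d1.insert w (d1.getD w [] ++ [t.1]))
    = d.modify (wtB t.1) [] (fun x => x ++ [t.1]) := by
  show (let w : Int := wtB t.1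
        let d1 := if d.contains w then d else d.insert w ([] : List String)
        d1.insert w (d1.getD w [] ++ [t.1])) = _
  set w := wtB t.1 with hw
  by_cases h : d.contains w
  · simp [h, PySem.Dict.modify]
  · simp only [h, Bool.false_eq_true, ↓reduceIte]
    rw [PySem.Dict.getD_insert_self, PySem.Dict.insert_insert_self, PySem.Dict.modify,
      PySem.Dict.getD_of_not_contains _ _ (by simpa using h)]

theorem update_weight_groups_eq_modify_fold (combined_terms : List (String × String × String)) :
    update_weight_groups combined_terms
    = (combined_terms.foldl (fun d p => d.modify (wtB p.1) [] (fun x => x ++ [p.1]))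
        (PySem.Dict.empty : PySem.Dict Int (List String))).items := by
  unfold update_weight_groups
  congr 1
  exact congrFun (congrFun (congrArg _ (funext fun d => funext fun t => stepA_eq_modify d t)) _) _

-- ===== VERDICT (by name: the statement is the Claim_ definition above) =====
theorem update_weight_groups_spec : Claim_equal_update_weight_groups := by
  intro xs _
  show update_weight_groups xs = update_weight_groups_alt xs
  rw [update_weight_groups_eq_modify_fold]
  set D := xs.foldl (fun d p => d.modify (wtB p.1) [] (fun x => x ++ [p.1]))
    (PySem.Dict.empty : PySem.Dict Int (List String)) with hD
  have hnd : D.keys.Nodup := by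
    rw [hD]
    exact PySem.Dict.nodup_keys_foldl_modify_key xs (fun p => wtB p.1) [] (fun _ p x => x ++ [p.1]) _
      (by simp [PySem.Dict.keys_empty])
  have hkeys : D.keys = PySem.List.dedup ((xs.map (fun p => p.1)).map wtB) := by
    rw [hD, PySem.Dict.keys_foldl_modify_key xs (fun p => wtB p.1) [] (fun _ p x => x ++ [p.1]),
      PySem.List.dedup_eq_ofList]
    rw [PySem.Dict.keys_empty, PySem.Set.update_nil_left, List.map_map]
    rfl
  have hgetD : ∀ c : Int, D.getD c [] = (xs.map (fun p => p.1)).filter (fun t => wtB t == c) := by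
    intro c
    have hfold : D = (xs.map (fun p => ((wtB p.1 : Int), p.1))).foldl
        (fun d q => d.modify q.1 [] (fun x => x ++ [q.2])) PySem.Dict.empty := by
      rw [hD, List.foldl_map]
    rw [hfold, PySem.Dict.getD_foldl_modify_append]
    simp only [List.filter_map, List.map_map]
    rfl
  rw [update_weight_groups_alt, PySem.Dict.items_eq_map_keys D hnd [], hkeys]
  simp only [List.map_inj_left]
  intro w _
  rw [hgetD w]
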